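-- pv_equiv track=rewrite | github.com/ykwei1127/MCMOT | draw_bbox.py | get_path_scene_cam
-- ===== SOURCE A (Python) =====
-- def get_path_scene_cam(camera_name):
--     scene_dict = {
--         'S01' :{
--             'path':'train',
--             'cams':('c001','c002','c003','c004','c005')
--         },
--         'S02' :{
--             'path':'validation',
--             'cams':('c006','c007','c008','c009')
--         },
--         'S03' :{
--             'path':'train',
--             'cams':('c010','c011','c012','c013','c014','c015')
--         },
--         'S04' :{
--             'path':'train',
--             'cams':('c016','c017','c018','c019','c020','c021','c022','c023','c024','c025',
--                     'c026','c027','c028','c029','c030','c031','c032','c033','c034','c035',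
--                     'c036','c037','c038','c039','c040')
--         },
--         'S05':{
--             'path':'validation',
--             'cams': ('c010','c016','c017','c018','c019','c020','c021','c022','c023',
--                     'c024','c025','c026','c027','c028','c029','c033','c034','c035','c036'),
--         },
--         'S06' :{
--             'path':'test',
--             'cams': ('c041','c042','c043','c044','c045','c046')
--         }
--     }
--     for scene_id,cam_megs in scene_dict.items():
--         cam_ids = cam_megs['cams']
--         cam_path = cam_megs['path']
--         if camera_name in cam_ids:
--             return cam_path, scene_id, camera_name
-- ===== SOURCE B (Python) =====
-- # Flat constant dict: each camera name -> (path, scene_id); one O(1) lookup replaces the nested scan.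
-- _CAM_TABLE = {
--     'c001': ('train', 'S01'),
--     'c002': ('train', 'S01'),
--     'c003': ('train', 'S01'),
--     'c004': ('train', 'S01'),
--     'c005': ('train', 'S01'),
--     'c006': ('validation', 'S02'),
--     'c007': ('validation', 'S02'),
--     'c008': ('validation', 'S02'),
--     'c009': ('validation', 'S02'),
--     'c010': ('train', 'S03'),
--     'c011': ('train', 'S03'),
--     'c012': ('train', 'S03'),
--     'c013': ('train', 'S03'),
--     'c014': ('train', 'S03'),
--     'c015': ('train', 'S03'),
--     'c016': ('train', 'S04'),
--     'c017': ('train', 'S04'),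
--     'c018': ('train', 'S04'),
--     'c019': ('train', 'S04'),
--     'c020': ('train', 'S04'),
--     'c021': ('train', 'S04'),
--     'c022': ('train', 'S04'),
--     'c023': ('train', 'S04'),
--     'c024': ('train', 'S04'),
--     'c025': ('train', 'S04'),
--     'c026': ('train', 'S04'),
--     'c027': ('train', 'S04'),
--     'c028': ('train', 'S04'),
--     'c029': ('train', 'S04'),
--     'c030': ('train', 'S04'),
--     'c031': ('train', 'S04'),
--     'c032': ('train', 'S04'),
--     'c033': ('train', 'S04'),
--     'c034': ('train', 'S04'),
--     'c035': ('train', 'S04'),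
--     'c036': ('train', 'S04'),
--     'c037': ('train', 'S04'),
--     'c038': ('train', 'S04'),
--     'c039': ('train', 'S04'),
--     'c040': ('train', 'S04'),
--     'c041': ('test', 'S06'),
--     'c042': ('test', 'S06'),
--     'c043': ('test', 'S06'),
--     'c044': ('test', 'S06'),
--     'c045': ('test', 'S06'),
--     'c046': ('test', 'S06'),
-- }
--
-- def get_path_scene_cam(camera_name):
--     hit = _CAM_TABLE.get(camera_name)
--     if hit is not None:
--         path, scene_id = hit
--         return path, scene_id, camera_name
--     return None
-- ===== Notes on version B (the rewrite author's own statement) =====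
-- stated objective: simpler
-- what changed: Replaced the per-call nested scan over per-scene camera tuples with one flat constant dict mapping each camera to its (path, scene_id) (first-occurrence semantics for the S05 duplicates baked in), so the function is a single dict lookup.
import Mathlib
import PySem

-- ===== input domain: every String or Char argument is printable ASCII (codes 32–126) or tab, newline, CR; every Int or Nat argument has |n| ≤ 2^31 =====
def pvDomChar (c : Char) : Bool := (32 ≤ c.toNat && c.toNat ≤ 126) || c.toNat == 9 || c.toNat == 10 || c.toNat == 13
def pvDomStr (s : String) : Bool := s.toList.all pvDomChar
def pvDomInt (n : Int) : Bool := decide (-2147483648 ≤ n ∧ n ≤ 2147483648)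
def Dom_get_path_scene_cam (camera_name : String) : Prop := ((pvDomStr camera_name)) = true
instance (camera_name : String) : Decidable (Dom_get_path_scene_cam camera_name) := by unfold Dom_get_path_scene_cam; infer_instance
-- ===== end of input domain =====

-- B replaces A's per-call scan over nested per-scene camera tuples by one flat constant
-- camera -> (path, scene_id) dict and a single lookup (objective: simpler).

-- ===== PORT A =====
-- A's scene_dict: (scene_id, path, cams) in insertion order.
def sceneTable : List (String × String × List String) :=
  [("S01", "train", ["c001", "c002", "c003", "c004", "c005"]),
   ("S02", "validation", ["c006", "c007", "c008", "c009"]),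
   ("S03", "train", ["c010", "c011", "c012", "c013", "c014", "c015"]),
   ("S04", "train", ["c016", "c017", "c018", "c019", "c020", "c021", "c022", "c023", "c024", "c025", "c026", "c027", "c028", "c029", "c030", "c031", "c032", "c033", "c034", "c035", "c036", "c037", "c038", "c039", "c040"]),
   ("S05", "validation", ["c010", "c016", "c017", "c018", "c019", "c020", "c021", "c022", "c023", "c024", "c025", "c026", "c027", "c028", "c029", "c033", "c034", "c035", "c036"]),
   ("S06", "test", ["c041", "c042", "c043", "c044", "c045", "c046"])]

-- the for-loop over scene_dict.items(): return at the first scene containing camera_name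
def scanScenes (camera_name : String) : List (String × String × List String) → Option (String × String × String)
  | [] => none
  | (scene_id, cam_path, cam_ids) :: rest =>
      if cam_ids.contains camera_name then some (cam_path, scene_id, camera_name)
      else scanScenes camera_name rest

def get_path_scene_cam (camera_name : String) : Option (String × String × String) :=
  scanScenes camera_name sceneTable

-- ===== PORT B =====
-- Source B's _CAM_TABLE: flat dict camera -> (path, scene_id)
def camTable : PySem.Dict String (String × String) :=
  PySem.Dict.mk
  [("c001", "train", "S01"),
   ("c002", "train", "S01"),
   ("c003", "train", "S01"),
   ("c004", "train", "S01"),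
   ("c005", "train", "S01"),
   ("c006", "validation", "S02"),
   ("c007", "validation", "S02"),
   ("c008", "validation", "S02"),
   ("c009", "validation", "S02"),
   ("c010", "train", "S03"),
   ("c011", "train", "S03"),
   ("c012", "train", "S03"),
   ("c013", "train", "S03"),
   ("c014", "train", "S03"),
   ("c015", "train", "S03"),
   ("c016", "train", "S04"),
   ("c017", "train", "S04"),
   ("c018", "train", "S04"),
   ("c019", "train", "S04"),
   ("c020", "train", "S04"),
   ("c021", "train", "S04"),
   ("c022", "train", "S04"),
   ("c023", "train", "S04"),
   ("c024", "train", "S04"),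
   ("c025", "train", "S04"),
   ("c026", "train", "S04"),
   ("c027", "train", "S04"),
   ("c028", "train", "S04"),
   ("c029", "train", "S04"),
   ("c030", "train", "S04"),
   ("c031", "train", "S04"),
   ("c032", "train", "S04"),
   ("c033", "train", "S04"),
   ("c034", "train", "S04"),
   ("c035", "train", "S04"),
   ("c036", "train", "S04"),
   ("c037", "train", "S04"),
   ("c038", "train", "S04"),
   ("c039", "train", "S04"),
   ("c040", "train", "S04"),
   ("c041", "test", "S06"),
   ("c042", "test", "S06"),
   ("c043", "test", "S06"),
   ("c044", "test", "S06"),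
   ("c045", "test", "S06"),
   ("c046", "test", "S06")]

def get_path_scene_cam_alt (camera_name : String) : Option (String × String × String) :=
  match camTable.get? camera_name with
  | some (path, scene_id) => some (path, scene_id, camera_name)
  | none => none

-- ===== PRECONDITION & SPEC =====
def Spec_get_path_scene_cam (camera_name : String) (out : Option (String × String × String)) : Prop := out = get_path_scene_cam_alt camera_name
instance (camera_name : String) (out : Option (String × String × String)) : Decidable (Spec_get_path_scene_cam camera_name out) := by unfold Spec_get_path_scene_cam; infer_instance

-- ===== CLAIM (what is proved, stated in full; the proofs are below) =====
def Claim_equal_get_path_scene_cam : Prop := ∀ (camera_name : String), Dom_get_path_scene_cam camera_name → Spec_get_path_scene_cam camera_name (get_path_scene_cam camera_name)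

-- ===== LEMMAS AND PROOFS =====
-- flatten a nested scene table into the corresponding flat (cam, path, scene) entries
def flattenScenes : List (String × String × List String) → List (String × String × String)
  | [] => []
  | (scene_id, cam_path, cam_ids) :: rest =>
      cam_ids.map (fun c => (c, cam_path, scene_id)) ++ flattenScenes rest

-- the flat entries contributed by scenes S01–S04 / S05 / S06
def flatPre : List (String × String × String) := flattenScenes (sceneTable.take 4)
def extras : List (String × String × String) := flattenScenes [sceneTable[4]!]
def flatPost : List (String × String × String) := flattenScenes [sceneTable[5]!]

theorem get?_mk_map_append (cam_ids : List String) (cam_path scene_id : String)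
    (rest : List (String × String × String)) (c : String) :
    (PySem.Dict.mk (cam_ids.map (fun cc => (cc, cam_path, scene_id)) ++ rest)).get? c =
      if cam_ids.contains c then some (cam_path, scene_id) else (PySem.Dict.mk rest).get? c := by
  induction cam_ids with
  | nil => simp
  | cons x xs ih =>
      by_cases h : x = c
      · subst h
        simp [PySem.Dict.get?_mk_cons]
      · have h' : (x == c) = false := beq_eq_false_iff_ne.mpr h
        have h'' : ¬ c = x := fun hh => h hh.symm
        simp [PySem.Dict.get?_mk_cons, h', h'', ih]

theorem scan_eq_flat_lookup (L : List (String × String × List String)) (c : String) :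
    scanScenes c L =
      (match (PySem.Dict.mk (flattenScenes L)).get? c with
       | some (p, sid) => some (p, sid, c)
       | none => none) := by
  induction L with
  | nil => simp [scanScenes, flattenScenes, PySem.Dict.get?]
  | cons hd rest ih =>
      obtain ⟨sid, p, cams⟩ := hd
      simp only [scanScenes, flattenScenes, get?_mk_map_append]
      by_cases h : c ∈ cams
      · simp [h]
      · simp [h, ih]

-- a later entry whose key does not match the query never affects the lookup
theorem get?_mk_skip (A : List (String × String × String)) (e : String × String × String)
    (B : List (String × String × String)) (c : String) (h : (e.1 == c) = false) :
    (PySem.Dict.mk (A ++ e :: B)).get? c = (PySem.Dict.mk (A ++ B)).get? c := by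
  obtain ⟨ek, ev⟩ := e
  induction A with
  | nil => simp_all [PySem.Dict.get?_mk_cons]
  | cons x xs ih =>
      obtain ⟨xk, xv⟩ := x
      simp [PySem.Dict.get?_mk_cons, ih]

-- a whole block of non-matching entries can be dropped
theorem get?_mk_skip_block (E : List (String × String × String))
    (A B : List (String × String × String)) (c : String)
    (h : ∀ e ∈ E, (e.1 == c) = false) :
    (PySem.Dict.mk (A ++ E ++ B)).get? c = (PySem.Dict.mk (A ++ B)).get? c := by
  induction E generalizing B with
  | nil => simp
  | cons e es ih =>
      have h1 : (e.1 == c) = false := h e (List.mem_cons_self ..)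
      calc (PySem.Dict.mk (A ++ (e :: es) ++ B)).get? c
          = (PySem.Dict.mk (A ++ e :: (es ++ B))).get? c := by
            simp [List.append_assoc]
        _ = (PySem.Dict.mk (A ++ (es ++ B))).get? c := get?_mk_skip A e (es ++ B) c h1
        _ = (PySem.Dict.mk (A ++ es ++ B)).get? c := by simp [List.append_assoc]
        _ = (PySem.Dict.mk (A ++ B)).get? c := ih B (fun e he => h e (List.mem_cons_of_mem _ he))

theorem flatten_split : flattenScenes sceneTable = flatPre ++ extras ++ flatPost := by decide

theorem dedup_ok (c : String) :
    (PySem.Dict.mk (flattenScenes sceneTable)).get? c = camTable.get? c := by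
  rw [flatten_split]
  by_cases hc : c ∈ extras.map (·.1)
  · -- c is one of the S05 camera literals: everything is closed, decide each case
    fin_cases hc <;> decide
  · have h : ∀ e ∈ extras, (e.1 == c) = false := by
      intro e he
      simp only [beq_eq_false_iff_ne, ne_eq]
      exact fun hec => hc (List.mem_map.mpr ⟨e, he, hec⟩)
    rw [get?_mk_skip_block extras flatPre flatPost c h]
    have : flatPre ++ flatPost = camTable.items := by decide
    rw [this]

-- ===== VERDICT (by name: the statement is the Claim_ definition above) =====
theorem get_path_scene_cam_spec : Claim_equal_get_path_scene_cam := by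
  intro camera_name _
  unfold Spec_get_path_scene_cam get_path_scene_cam get_path_scene_cam_alt
  rw [scan_eq_flat_lookup, dedup_ok]
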